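-- pv_equiv track=rewrite | github.com/hide-in-cloud/leetcode-test-python | 困难/#214. 最短回文串.py | shortestPalindrome2
-- ===== SOURCE A (Python) =====
-- def shortestPalindrome2(s: str) -> str:
--     """右指针从末尾开始遍历找到最长的回文串"""
--     left, right = 0, len(s) - 1
--     while left < right:
--         while left < right and s[left] != s[right]:
--             right -= 1
--         end = right + 1
--         if s[left:end][::-1] == s[left:end]:
--             return s[end:][::-1] + s
--         else:
--             right -= 1
--     return s[1:][::-1] + s
-- ===== SOURCE B (Python) =====
-- def shortestPalindrome2(s: str) -> str:
--     """KMP failure function on s + '\x00' + reversed(s): the final failure value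
--     is the length of the longest palindromic prefix of s."""
--     t = s + '\x00' + s[::-1]
--     fail = [0]
--     k = 0
--     for i in range(1, len(t)):
--         c = t[i]
--         while k and t[k] != c:
--             k = fail[k - 1]
--         if t[k] == c:
--             k += 1
--         fail.append(k)
--     return s[k:][::-1] + s
-- ===== Notes on version B (the rewrite author's own statement) =====
-- stated objective: faster
-- what changed: Replaced the quadratic two-pointer scan with repeated slice-reverse palindrome checks by a single KMP failure-function pass over s + '\x00' + reversed(s), whose final value is the length of the longest palindromic prefix.
import Mathlib
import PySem

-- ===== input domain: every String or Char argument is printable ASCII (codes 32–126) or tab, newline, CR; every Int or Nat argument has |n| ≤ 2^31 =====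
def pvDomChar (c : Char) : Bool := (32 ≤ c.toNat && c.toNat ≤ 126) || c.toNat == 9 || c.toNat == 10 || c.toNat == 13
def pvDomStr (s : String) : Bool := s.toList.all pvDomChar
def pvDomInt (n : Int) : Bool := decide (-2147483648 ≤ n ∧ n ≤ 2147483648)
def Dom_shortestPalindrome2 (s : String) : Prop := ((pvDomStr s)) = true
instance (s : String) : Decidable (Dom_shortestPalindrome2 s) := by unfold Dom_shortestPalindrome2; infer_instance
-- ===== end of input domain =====

-- B replaces A's quadratic two-pointer scan (with a slice-reverse palindrome check per step)
-- by a single KMP failure-function pass over s + '\x00' + reversed(s)  (objective: faster).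


-- ===== PORT A =====
-- fuel-guarded for totality: fuel = (right - left).toNat suffices, the loop decrements right
def aInner (L : List Char) (left : Int) : Nat → Int → Int
  | 0, right => right
  | fuel + 1, right =>
    if left < right ∧ PySem.List.pyGet? L left ≠ PySem.List.pyGet? L right then
      aInner L left fuel (right - 1)
    else right

-- fuel-guarded for totality: fuel = (right - left + 1).toNat suffices
def aOuter (L : List Char) (left : Int) : Nat → Int → String
  | 0, _ =>
    String.ofList ((PySem.List.slice L (some 1) none).reverse ++ L)
  | fuel + 1, right =>
    if left < right then
      let right' := aInner L left (right - left).toNat right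
      let e := right' + 1
      if (PySem.List.slice L (some left) (some e)).reverse = PySem.List.slice L (some left) (some e) then
        String.ofList ((PySem.List.slice L (some e) none).reverse ++ L)
      else
        aOuter L left fuel (right' - 1)
    else
      String.ofList ((PySem.List.slice L (some 1) none).reverse ++ L)

def shortestPalindrome2 (s : String) : String :=
  aOuter s.toList 0 s.toList.length ((s.toList.length : Int) - 1)

-- ===== PORT B =====
def kmpBack (t : List Char) (fail : Array Nat) (c : Char) : Nat → Nat → Nat
  | 0, k => k
  | fuel + 1, k =>
    if k ≠ 0 ∧ t.getD k ' ' ≠ c then kmpBack t fail c fuel (fail.getD (k - 1) 0) else k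

-- fuel-guarded for totality: fuel = t.length suffices for the range(1, len(t)) loop
def kmpLoop (t : List Char) : Nat → Array Nat → Nat → Nat → Nat
  | 0, _, k, _ => k
  | fuel + 1, fail, k, i =>
    if i < t.length then
      let c := t.getD i ' '
      let k1 := kmpBack t fail c k k
      let k2 := if t.getD k1 ' ' = c then k1 + 1 else k1
      kmpLoop t fuel (fail.push k2) k2 (i + 1)
    else k


def shortestPalindrome2_alt (s : String) : String :=
  let L := s.toList
  let t := L ++ '\x00' :: L.reverse     -- t = s + '\x00' + s[::-1]
  let k := kmpLoop t t.length #[0] 0 1  -- fail = [0]; k = 0; loop over range(1, len(t))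
  String.ofList ((L.drop k).reverse ++ L)   -- s[k:][::-1] + s

-- ===== PRECONDITION & SPEC =====
def Spec_shortestPalindrome2 (s : String) (out : String) : Prop := out = shortestPalindrome2_alt s
instance (s : String) (out : String) : Decidable (Spec_shortestPalindrome2 s out) := by unfold Spec_shortestPalindrome2; infer_instance

-- ===== CLAIM (what is proved, stated in full; the proofs are below) =====
def Claim_equal_shortestPalindrome2 : Prop := ∀ (s : String), Dom_shortestPalindrome2 s → Spec_shortestPalindrome2 s (shortestPalindrome2 s)

-- ===== LEMMAS AND PROOFS =====

def bord (u : List Char) (b : Nat) : Bool := b ≤ u.length && u.take b == u.drop (u.length - b)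
def maxB (u : List Char) : Nat := Nat.findGreatest (fun b => bord u b = true) (u.length - 1)

theorem bord_zero (u : List Char) : bord u 0 = true := by simp [bord]

theorem bord_iff (u : List Char) (b : Nat) :
    bord u b = true ↔ b ≤ u.length ∧ u.take b = u.drop (u.length - b) := by
  simp [bord]

theorem maxB_bord (u : List Char) : bord u (maxB u) = true :=
  Nat.findGreatest_spec (P := fun b => bord u b = true) (Nat.zero_le _) (bord_zero u)

theorem maxB_le (u : List Char) : maxB u ≤ u.length - 1 := Nat.findGreatest_le _

theorem le_maxB (u : List Char) (b : Nat) (h : bord u b = true) (hb : b ≤ u.length - 1) :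
    b ≤ maxB u := Nat.le_findGreatest hb h

-- border extension
theorem bord_ext (u : List Char) (c : Char) (b : Nat) (hb : b < u.length) :
    bord (u ++ [c]) (b + 1) = true ↔ (bord u b = true ∧ u.getD b ' ' = c) := by
  rw [bord_iff, bord_iff]
  have h1 : (u ++ [c]).take (b + 1) = u.take b ++ [u.getD b ' '] := by
    rw [List.take_append_of_le_length (by omega), List.take_add_one]
    simp [List.getD, List.getElem?_eq_getElem hb]
  have h2 : (u ++ [c]).drop ((u ++ [c]).length - (b + 1)) = u.drop (u.length - b) ++ [c] := by
    simp only [List.length_append, List.length_cons, List.length_nil]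
    rw [show u.length + 1 - (b + 1) = u.length - b by omega,
      List.drop_append_of_le_length (by omega)]
  rw [h1, h2]
  constructor
  · rintro ⟨-, h⟩
    have := List.append_inj' h (by rfl)
    refine ⟨⟨by omega, this.1⟩, by simpa using this.2⟩
  · rintro ⟨⟨-, h⟩, hc⟩
    exact ⟨by simp; omega, by rw [h, hc]⟩

-- border of a border
theorem bord_nest (u : List Char) (a b : Nat) (ha : bord u a = true) (hb : bord u b = true)
    (hab : a ≤ b) : bord (u.take b) a = true := by
  rw [bord_iff] at ha hb ⊢
  obtain ⟨hb1, hb2⟩ := hb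
  obtain ⟨ha1, ha2⟩ := ha
  have hlen : (u.take b).length = b := by simp; omega
  refine ⟨by omega, ?_⟩
  rw [List.take_take, min_eq_left hab, hlen, hb2, List.drop_drop, ha2]
  congr 1; omega

theorem bord_trans (u : List Char) (a b : Nat) (hb : bord u b = true)
    (ha : bord (u.take b) a = true) : bord u a = true := by
  rw [bord_iff] at hb ha ⊢
  obtain ⟨hb1, hb2⟩ := hb
  have hlen : (u.take b).length = b := by simp; omega
  rw [hlen] at ha
  obtain ⟨ha1, ha2⟩ := ha
  rw [List.take_take, min_eq_left ha1] at ha2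
  refine ⟨by omega, ?_⟩
  rw [ha2, hb2, List.drop_drop]
  congr 1; omega

theorem getD_take (t : List Char) (i k : Nat) (h : k < i) (d : Char) :
    (t.take i).getD k d = t.getD k d := by
  simp [List.getD, h]

-- the big one: the while loop followed by the `if t[k]==c: k+=1` computes maxB (u ++ [c])
theorem kmpBack_step (t : List Char) (fail : Array Nat) (i : Nat) (hi1 : 1 ≤ i)
    (hi2 : i ≤ t.length)
    (hfail : ∀ j, j < i → fail.getD j 0 = maxB (t.take (j + 1))) (c : Char) :
    ∀ k, ∀ fuel, k ≤ fuel → bord (t.take i) k = true → k < i →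
      (∀ b, k < b → b < i → bord (t.take i) b = true → t.getD b ' ' ≠ c) →
      (if t.getD (kmpBack t fail c fuel k) ' ' = c then kmpBack t fail c fuel k + 1
       else kmpBack t fail c fuel k) = maxB (t.take i ++ [c]) := by
  intro k
  induction k using Nat.strong_induction_on with
  | _ k ih =>
    intro fuel hfuel hbord hki hinv
    set u := t.take i with hu
    have hulen : u.length = i := by simp [hu]; omega
    by_cases hcond : k ≠ 0 ∧ t.getD k ' ' ≠ c
    · -- loop body runs: k := fail[k-1] = maxB (take k t)
      obtain ⟨fuel, rfl⟩ : ∃ f, fuel = f + 1 := ⟨fuel - 1, by omega⟩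
      rw [show kmpBack t fail c (fuel+1) k = kmpBack t fail c fuel (fail.getD (k-1) 0) by
        rw [kmpBack, if_pos hcond]]
      have hk1 : 1 ≤ k := by omega
      have htk : t.take k = u.take k := by
        rw [hu, List.take_take, min_eq_left (by omega)]
      have hfk : fail.getD (k - 1) 0 = maxB (u.take k) := by
        rw [hfail (k-1) (by omega), show k - 1 + 1 = k by omega, htk]
      set k' := fail.getD (k - 1) 0 with hk'
      have hlenuk : (u.take k).length = k := by simp [hulen]; omega
      have hk'le : k' ≤ k - 1 := by
        have := maxB_le (u.take k); rw [hlenuk] at this; omega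
      have hbord' : bord u k' = true :=
        bord_trans u k' k hbord (by rw [hfk]; exact maxB_bord _)
      refine ih k' (by omega) fuel (by omega) hbord' (by omega) ?_
      intro b hb1 hb2 hb3
      rcases Nat.lt_trichotomy b k with hbk | rfl | hbk
      · -- k' < b < k : b would be a bigger border of take k u
        exfalso
        have : bord (u.take k) b = true := bord_nest u b k hb3 hbord (by omega)
        have := le_maxB (u.take k) b this (by rw [hlenuk]; omega)
        rw [← hfk] at this; omega
      · exact hcond.2
      · exact hinv b hbk hb2 hb3
    · -- loop exits with value k
      have hstop : kmpBack t fail c fuel k = k := by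
        cases fuel with
        | zero => rfl
        | succ f => rw [kmpBack]; simp only [if_neg hcond]
      rw [hstop]
      have hgetu : ∀ b, b < i → u.getD b ' ' = t.getD b ' ' := fun b hb => getD_take t i b hb ' '
      by_cases hc : t.getD k ' ' = c
      · rw [if_pos hc]
        -- maxB (u ++ [c]) = k + 1
        have hb1 : bord (u ++ [c]) (k + 1) = true := by
          rw [bord_ext u c k (by omega)]
          exact ⟨hbord, by rw [hgetu k hki, hc]⟩
        have hlo : k + 1 ≤ maxB (u ++ [c]) := by
          apply le_maxB _ _ hb1; simp [hulen]; omega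
        have hhi : maxB (u ++ [c]) ≤ k + 1 := by
          by_contra hgt
          have hmb : bord (u ++ [c]) (maxB (u ++ [c])) = true := maxB_bord _
          obtain ⟨b, hbm⟩ : ∃ b, maxB (u ++ [c]) = b + 1 := ⟨maxB (u ++ [c]) - 1, by omega⟩
          have hmle : b + 1 ≤ i := by
            have := maxB_le (u ++ [c]); simp [hulen] at this; omega
          rw [hbm, bord_ext u c b (by omega)] at hmb
          exact hinv b (by omega) (by omega) hmb.1 (by rw [← hgetu b (by omega)]; exact hmb.2)
        omega
      · rw [if_neg hc]
        -- here k = 0 and no border extends: maxB (u ++ [c]) = 0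
        have hk0 : k = 0 := by by_contra h; exact hcond ⟨h, hc⟩
        subst hk0
        by_contra hne
        have h0 : 0 < maxB (u ++ [c]) := Nat.pos_of_ne_zero (fun h => hne (h ▸ rfl))
        have hmb : bord (u ++ [c]) (maxB (u ++ [c])) = true := maxB_bord _
        obtain ⟨b, hbm⟩ : ∃ b, maxB (u ++ [c]) = b + 1 := ⟨maxB (u ++ [c]) - 1, by omega⟩
        have hmle : b + 1 ≤ i := by
          have := maxB_le (u ++ [c]); simp [hulen] at this; omega
        rw [hbm, bord_ext u c b (by omega)] at hmb
        rcases Nat.eq_zero_or_pos b with rfl | hbpos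
        · exact hc (by rw [← hgetu 0 (by omega)]; exact hmb.2)
        · exact hinv b (by omega) (by omega) hmb.1 (by rw [← hgetu b (by omega)]; exact hmb.2)

theorem take_succ_getD (t : List Char) (i : Nat) (h : i < t.length) :
    t.take (i + 1) = t.take i ++ [t.getD i ' '] := by
  rw [List.take_add_one]
  simp [List.getD, List.getElem?_eq_getElem h]

theorem getD_push_lt (a : Array Nat) (x : Nat) (j : Nat) (h : j < a.size) :
    (a.push x).getD j 0 = a.getD j 0 := by
  have h2 : j < (a.push x).size := by simp; omega
  rw [Array.getD, Array.getD, dif_pos h2, dif_pos h]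
  show (a.push x)[j] = a[j]
  rw [Array.getElem_push_lt]

theorem getD_push_eq (a : Array Nat) (x : Nat) :
    (a.push x).getD a.size 0 = x := by
  have h2 : a.size < (a.push x).size := by simp
  rw [Array.getD, dif_pos h2]
  show (a.push x)[a.size] = x
  rw [Array.getElem_push_eq]

theorem kmpLoop_char (t : List Char) :
    ∀ d i fail k, t.length - i ≤ d → 1 ≤ i → i ≤ t.length → fail.size = i →
      (∀ j, j < i → fail.getD j 0 = maxB (t.take (j + 1))) →
      k = maxB (t.take i) → kmpLoop t d fail k i = maxB t := by
  intro d
  induction d with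
  | zero =>
    intro i fail k hd hi1 hi2 hsize hfail hk
    show k = maxB t
    have : i = t.length := by omega
    rw [hk, this, List.take_length]
  | succ d ih =>
    intro i fail k hd hi1 hi2 hsize hfail hk
    rw [kmpLoop]
    by_cases hlt : i < t.length
    · rw [if_pos hlt]
      have hulen : (t.take i).length = i := by simp; omega
      have hkmaxle : k ≤ i - 1 := by have := maxB_le (t.take i); rw [hulen] at this; omega
      have hstep := kmpBack_step t fail i hi1 hi2 hfail (t.getD i ' ') k k le_rfl
        (hk ▸ maxB_bord _) (by omega)
        (fun b hb1 hb2 hb3 => absurd (le_maxB _ b hb3 (by rw [hulen]; omega)) (by omega))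
      rw [← take_succ_getD t i hlt] at hstep
      refine ih (i + 1) _ _ (by omega) (by omega) (by omega) (by simp [hsize]) ?_ hstep
      intro j hj
      rcases Nat.lt_or_ge j i with hji | hji
      · rw [← hfail j hji]
        exact getD_push_lt fail _ j (by omega)
      · have hji' : j = i := by omega
        subst hji'
        subst hsize
        rw [getD_push_eq]
        exact hstep
    · rw [if_neg hlt]
      have : i = t.length := by omega
      rw [hk, this, List.take_length]

def isPalPref (L : List Char) (ℓ : Nat) : Bool := (L.take ℓ).reverse == L.take ℓ
def palLen (L : List Char) : Nat := Nat.findGreatest (fun ℓ => isPalPref L ℓ = true) L.length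

theorem isPalPref_zero (L : List Char) : isPalPref L 0 = true := by simp [isPalPref]

theorem palLen_le (L : List Char) : palLen L ≤ L.length := Nat.findGreatest_le _

theorem palLen_pal (L : List Char) : isPalPref L (palLen L) = true :=
  Nat.findGreatest_spec (P := fun ℓ => isPalPref L ℓ = true) (Nat.zero_le _) (isPalPref_zero L)

theorem le_palLen (L : List Char) (ℓ : Nat) (h : isPalPref L ℓ = true) (hb : ℓ ≤ L.length) :
    ℓ ≤ palLen L := Nat.le_findGreatest hb h

-- the concatenation trick: borders of L ++ sep :: reverse L (of length ≤ 2n) are exactly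
-- the palindromic prefixes of L, provided sep does not occur in L
theorem drop_concat (L : List Char) (sep : Char) (ℓ : Nat) (hl : ℓ ≤ L.length) :
    (L ++ sep :: L.reverse).drop ((L ++ sep :: L.reverse).length - ℓ) = (L.take ℓ).reverse := by
  have h1 : (L ++ sep :: L.reverse).length = 2 * L.length + 1 := by simp; omega
  rw [h1, show 2 * L.length + 1 - ℓ = L.length + (L.length - ℓ + 1) by omega,
    List.drop_append, List.drop_eq_nil_of_le (by omega), List.nil_append,
    show L.length + (L.length - ℓ + 1) - L.length = (L.length - ℓ) + 1 by omega,
    List.drop_succ_cons, List.drop_reverse,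
    show L.length - (L.length - ℓ) = ℓ by omega]

theorem take_concat (L : List Char) (sep : Char) (ℓ : Nat) (hl : ℓ ≤ L.length) :
    (L ++ sep :: L.reverse).take ℓ = L.take ℓ := List.take_append_of_le_length hl

theorem bord_concat_iff (L : List Char) (sep : Char) (hsep : sep ∉ L) (ℓ : Nat)
    (hl : ℓ ≤ 2 * L.length) :
    bord (L ++ sep :: L.reverse) ℓ = true ↔ ℓ ≤ L.length ∧ isPalPref L ℓ = true := by
  have hlen : (L ++ sep :: L.reverse).length = 2 * L.length + 1 := by simp; omega
  constructor
  · intro h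
    rw [bord_iff] at h
    obtain ⟨-, heq⟩ := h
    have hln : ℓ ≤ L.length := by
      by_contra hgt
      push_neg at hgt
      -- compare position L.length of the two sides: sep on the left, a char of L on the right
      have h2 := congrArg (fun l => l[L.length]?) heq
      simp only at h2
      rw [List.getElem?_take_of_lt (by omega), List.getElem?_drop] at h2
      have hsepv : (L ++ sep :: L.reverse)[L.length]? = some sep := by
        rw [List.getElem?_append_right le_rfl]
        simp
      rw [hsepv] at h2
      set j := (L ++ sep :: L.reverse).length - ℓ + L.length with hj
      have hjge : L.length + 1 ≤ j := by omega
      have hjlt : j < (L ++ sep :: L.reverse).length := by omega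
      have : (L ++ sep :: L.reverse)[j]? = L.reverse[j - L.length - 1]? := by
        rw [List.getElem?_append_right (by omega)]
        rw [show j - L.length = (j - L.length - 1) + 1 by omega]
        simp
      rw [this] at h2
      have hjr : j - L.length - 1 < L.reverse.length := by simp; omega
      rw [List.getElem?_eq_getElem hjr] at h2
      have hmem : L.reverse[j - L.length - 1] ∈ L := by
        have := List.getElem_mem hjr
        rwa [List.mem_reverse] at this
      exact hsep (by rw [← Option.some_inj.mp h2] at hmem; exact hmem)
    refine ⟨hln, ?_⟩
    rw [take_concat L sep ℓ hln, drop_concat L sep ℓ hln] at heq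
    simp only [isPalPref, beq_iff_eq]
    exact heq.symm
  · rintro ⟨hln, hpal⟩
    rw [bord_iff]
    refine ⟨by omega, ?_⟩
    rw [take_concat L sep ℓ hln, drop_concat L sep ℓ hln]
    have hp : (L.take ℓ).reverse = L.take ℓ := by
      simpa only [isPalPref, beq_iff_eq] using hpal
    exact hp.symm

theorem maxB_concat (L : List Char) (sep : Char) (hsep : sep ∉ L) :
    maxB (L ++ sep :: L.reverse) = palLen L := by
  have hlen : (L ++ sep :: L.reverse).length = 2 * L.length + 1 := by simp; omega
  apply le_antisymm
  · have h1 := maxB_bord (L ++ sep :: L.reverse)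
    have h2 := maxB_le (L ++ sep :: L.reverse)
    rw [hlen] at h2
    rw [bord_concat_iff L sep hsep _ (by omega)] at h1
    exact le_palLen L _ h1.2 h1.1
  · apply le_maxB
    · rw [bord_concat_iff L sep hsep _ (by have := palLen_le L; omega)]
      exact ⟨palLen_le L, palLen_pal L⟩
    · rw [hlen]; have := palLen_le L; omega

theorem aInner_le (L : List Char) (left : Int) :
    ∀ fuel (right : Int), aInner L left fuel right ≤ right := by
  intro fuel
  induction fuel with
  | zero => intro right; exact le_rfl
  | succ f ih =>
    intro right
    rw [aInner]
    by_cases hc : left < right ∧ PySem.List.pyGet? L left ≠ PySem.List.pyGet? L right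
    · rw [if_pos hc]; have := ih (right - 1); omega
    · rw [if_neg hc]

theorem aInner_ge (L : List Char) (left : Int) :
    ∀ fuel (right : Int), left ≤ right → left ≤ aInner L left fuel right := by
  intro fuel
  induction fuel with
  | zero => intro right h; exact h
  | succ f ih =>
    intro right h
    rw [aInner]
    by_cases hc : left < right ∧ PySem.List.pyGet? L left ≠ PySem.List.pyGet? L right
    · rw [if_pos hc]; exact ih (right - 1) (by omega)
    · rw [if_neg hc]; exact h

theorem aInner_skip (L : List Char) (left : Int) :
    ∀ (fuel : Nat) (right : Int), right - left ≤ (fuel : Int) →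
      ∀ x : Int, aInner L left fuel right < x → x ≤ right →
        PySem.List.pyGet? L left ≠ PySem.List.pyGet? L x := by
  intro fuel
  induction fuel with
  | zero =>
    intro right hf x h1 h2
    rw [show aInner L left 0 right = right from rfl] at h1
    omega
  | succ f ih =>
    intro right hf x h1 h2
    rw [aInner] at h1
    by_cases hc : left < right ∧ PySem.List.pyGet? L left ≠ PySem.List.pyGet? L right
    · rw [if_pos hc] at h1
      rcases eq_or_lt_of_le h2 with rfl | hlt
      · exact hc.2
      · exact ih (right - 1) (by omega) x h1 (by omega)
    · rw [if_neg hc] at h1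
      omega

theorem palPref_first_last (L : List Char) (ℓ : Nat) (h2 : 2 ≤ ℓ) (hn : ℓ ≤ L.length)
    (hp : isPalPref L ℓ = true) : L[0]? = L[ℓ - 1]? := by
  have heq : (L.take ℓ).reverse = L.take ℓ := by simpa only [isPalPref, beq_iff_eq] using hp
  have hlen : (L.take ℓ).length = ℓ := by simp; omega
  have h0 := congrArg (fun l => l[0]?) heq
  simp only at h0
  rw [List.getElem?_reverse (by omega), hlen] at h0
  rw [List.getElem?_take_of_lt (by omega), List.getElem?_take_of_lt (by omega),
    show ℓ - 1 - 0 = ℓ - 1 by omega] at h0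
  exact h0.symm

theorem palLen_exit (L : List Char)
    (hinv : ∀ ℓ, ℓ ≤ L.length → 2 ≤ ℓ → isPalPref L ℓ = false) :
    L.drop (palLen L) = L.drop 1 := by
  cases L with
  | nil => simp
  | cons a l =>
    have h1 : isPalPref (a :: l) 1 = true := by simp [isPalPref]
    have hle : 1 ≤ palLen (a :: l) := le_palLen _ 1 h1 (by simp)
    have hge : palLen (a :: l) ≤ 1 := by
      by_contra h
      have hf := hinv (palLen (a :: l)) (palLen_le _) (by omega)
      rw [palLen_pal] at hf
      cases hf
    rw [le_antisymm hge hle]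

theorem aOuter_exit_body (L : List Char) (right : Int)
    (hinv : ∀ ℓ : Nat, ℓ ≤ L.length → right + 1 < (ℓ:Int) → isPalPref L ℓ = false)
    (hneg : right ≤ 0) :
    String.ofList ((PySem.List.slice L (some 1) none).reverse ++ L) =
      String.ofList ((L.drop (palLen L)).reverse ++ L) := by
  rw [PySem.List.slice_from L (by omega : (0:Int) ≤ (1:Int)),
    show ((1:Int)).toNat = 1 from rfl,
    palLen_exit L (fun ℓ hl h2 => hinv ℓ hl (by omega))]

theorem aOuter_char (L : List Char) :
    ∀ d : Nat, ∀ right : Int, (right + 1).toNat ≤ d → right ≤ (L.length : Int) - 1 →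
      (∀ ℓ : Nat, ℓ ≤ L.length → right + 1 < (ℓ : Int) → isPalPref L ℓ = false) →
      aOuter L 0 d right = String.ofList ((L.drop (palLen L)).reverse ++ L) := by
  intro d
  induction d with
  | zero =>
    intro right hd hrb hinv
    exact aOuter_exit_body L right hinv (by omega)
  | succ d ih =>
    intro right hd hrb hinv
    by_cases hpos : (0:Int) < right
    · rw [aOuter, if_pos hpos]
      have hr0 : (0:Int) ≤ aInner L 0 (right - 0).toNat right :=
        aInner_ge L 0 (right - 0).toNat right (by omega)
      have hrle := aInner_le L 0 (right - 0).toNat right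
      set r := aInner L 0 (right - 0).toNat right with hrdef
      set rn := r.toNat with hrndef
      have hr : r = (rn : Int) := by omega
      have hslice : PySem.List.slice L (some 0) (some (r + 1)) = L.take (rn + 1) := by
        rw [PySem.List.slice_zero_start, PySem.List.slice_to L (by omega),
          show (r + 1).toNat = rn + 1 by omega]
      have hskip : ∀ ℓ : Nat, ℓ ≤ L.length → rn + 1 < ℓ → (ℓ:Int) ≤ right + 1 →
          isPalPref L ℓ = false := by
        intro ℓ hln hgt hle
        by_contra hT
        have hT' : isPalPref L ℓ = true := by simpa using hT
        have hfl := palPref_first_last L ℓ (by omega) hln hT'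
        have hne := aInner_skip L 0 (right - 0).toNat right (by push_cast; omega)
          ((ℓ - 1 : Nat) : Int) (by omega) (by omega)
        rw [PySem.List.pyGet?_zero, PySem.List.pyGet?_natCast] at hne
        exact hne (hfl ▸ rfl)
      by_cases hpal : isPalPref L (rn + 1) = true
      · rw [if_pos (by
          rw [hslice]
          exact beq_iff_eq.mp (by simpa only [isPalPref] using hpal))]
        rw [PySem.List.slice_from L (by omega), show (r + 1).toNat = rn + 1 by omega]
        have hple : rn + 1 ≤ L.length := by omega
        have h1 : rn + 1 ≤ palLen L := le_palLen L _ hpal hple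
        have h2 : palLen L ≤ rn + 1 := by
          by_contra hgt
          have hpl := palLen_pal L
          have hplle := palLen_le L
          rcases le_or_gt ((palLen L : Int)) (right + 1) with hc | hc
          · rw [hskip (palLen L) hplle (by omega) hc] at hpl
            cases hpl
          · rw [hinv (palLen L) hplle (by omega)] at hpl
            cases hpl
        rw [le_antisymm h2 h1]
      · rw [if_neg (by
          rw [hslice]
          intro hEq
          exact hpal (by simp only [isPalPref]; exact beq_iff_eq.mpr hEq))]
        apply ih (r - 1) (by omega) (by omega)
        intro ℓ hln hgt
        rcases Nat.lt_trichotomy ℓ (rn + 1) with hc | hc | hc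
        · omega
        · subst hc
          simpa using hpal
        · rcases le_or_gt ((ℓ : Int)) (right + 1) with hc2 | hc2
          · exact hskip ℓ hln (by omega) hc2
          · exact hinv ℓ hln (by omega)
    · rw [aOuter, if_neg hpos]
      exact aOuter_exit_body L right hinv (by omega)


theorem A_char (s : String) :
    shortestPalindrome2 s =
      String.ofList ((s.toList.drop (palLen s.toList)).reverse ++ s.toList) := by
  unfold shortestPalindrome2
  apply aOuter_char s.toList s.toList.length ((s.toList.length : Int) - 1) (by omega) (by omega)
  intro ℓ h1 h2
  exact absurd h1 (by omega)

theorem B_char (s : String) (hsep : '\x00' ∉ s.toList) :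
    shortestPalindrome2_alt s =
      String.ofList ((s.toList.drop (palLen s.toList)).reverse ++ s.toList) := by
  have hlen : (s.toList ++ '\x00' :: s.toList.reverse).length = 2 * s.toList.length + 1 := by
    simp; omega
  have htake1 : ∃ x, (s.toList ++ '\x00' :: s.toList.reverse).take 1 = [x] := by
    cases h : s.toList with
    | nil => exact ⟨'\x00', rfl⟩
    | cons a l => exact ⟨a, rfl⟩
  obtain ⟨x, hx⟩ := htake1
  have hmax1 : maxB ((s.toList ++ '\x00' :: s.toList.reverse).take 1) = 0 := by
    rw [hx]; rfl
  have hk : kmpLoop (s.toList ++ '\x00' :: s.toList.reverse)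
      (s.toList ++ '\x00' :: s.toList.reverse).length #[0] 0 1 =
      maxB (s.toList ++ '\x00' :: s.toList.reverse) := by
    apply kmpLoop_char _ (s.toList ++ '\x00' :: s.toList.reverse).length 1 #[0] 0
      (by omega) (by omega) (by omega) rfl
    · intro j hj
      have hj0 : j = 0 := by omega
      subst hj0
      rw [hmax1]; rfl
    · exact hmax1.symm
  show String.ofList
      ((s.toList.drop (kmpLoop (s.toList ++ '\x00' :: s.toList.reverse)
        (s.toList ++ '\x00' :: s.toList.reverse).length #[0] 0 1)).reverse
        ++ s.toList) = _
  rw [hk, maxB_concat s.toList '\x00' hsep]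

-- ===== VERDICT (by name: the statement is the Claim_ definition above) =====
theorem shortestPalindrome2_spec : Claim_equal_shortestPalindrome2 := by
  intro s hDom
  unfold Spec_shortestPalindrome2
  have hsep : '\x00' ∉ s.toList := by
    intro hmem
    have := List.all_eq_true.mp hDom _ hmem
    simp [pvDomChar] at this
  rw [A_char, B_char s hsep]
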